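-- pv_equiv track=rewrite | github.com/111geon/problemsolving | swea/전기자동차충전소.py | helper
-- ===== SOURCE A (Python) =====
-- MAX_INT = 2**63-1
--
-- def helper(houses):
--     ans = MAX_INT
--     for cx in range(-15, 16):
--         for cy in range(-15, 16):
--             temp = 0
--             for hx, hy, d in houses:
--                 cald = abs(hx-cx) + abs(hy-cy)
--                 if cald == 0 or cald > d: break
--                 temp += cald
--             else:
--                 ans = min(ans, temp)
--
--     if ans != MAX_INT: return ans
--
--     for cx in range(-15, 16):
--         for cy in range(-15, 16):
--             for i in range(-15, 16):
--                 for j in range(-15, 16):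
--                     temp = 0
--                     for hx, hy, d in houses:
--                         cald1 = abs(hx-cx) + abs(hy-cy)
--                         cald2 = abs(hx-i) + abs(hy-j)
--                         if cald1 == 0 or cald2 == 0 or (cald1 > d and cald2 > d): break
--                         temp += min(cald1, cald2)
--                     else:
--                         ans = min(ans, temp)
--
--     return ans
-- ===== SOURCE B (Python) =====
-- MAX_INT = 2**63-1
--
-- def helper(houses):
--     pts = [(x, y) for x in range(-15, 16) for y in range(-15, 16)]
--
--     # Per grid point: distance to each house, a "some house at distance 0" flag,
--     # and a bitmask of the houses the point does NOT cover (dist > d).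
--     def precompute(px, py):
--         ds = [abs(hx-px)+abs(hy-py) for hx, hy, d in houses]
--         z = any(c == 0 for c in ds)
--         um = 0
--         for far in reversed([abs(hx-px)+abs(hy-py) > d for hx, hy, d in houses]):
--             um = 2*um + (1 if far else 0)
--         return (z, um, ds)
--
--     data = [precompute(px, py) for px, py in pts]
--
--     ans = MAX_INT
--     for (z, um, ds) in data:
--         if (not z) and um == 0:
--             ans = min(ans, sum(ds))
--     if ans != MAX_INT:
--         return ans
--
--     # pair cost is symmetric, so scan only ordered pairs; validity is an O(1) mask test
--     suffix = data
--     while suffix: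
--         (z1, um1, ds1) = suffix[0]
--         for (z2, um2, ds2) in suffix:
--             if (not z1) and (not z2) and (um1 & um2) == 0:
--                 ans = min(ans, sum(min(a, b) for a, b in zip(ds1, ds2)))
--         suffix = suffix[1:]
--     return ans
-- ===== Notes on version B (the rewrite author's own statement) =====
-- stated objective: alternative
-- what changed: B precomputes per grid point the house-distance list, a zero-distance flag and an uncovered-house bitmask, replacing A's fused break-accumulate rescan of the houses by an O(1) mask test (um1 & um2 == 0) per charger pair, and scans only ordered pairs since the pair cost is symmetric.
import Mathlib
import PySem

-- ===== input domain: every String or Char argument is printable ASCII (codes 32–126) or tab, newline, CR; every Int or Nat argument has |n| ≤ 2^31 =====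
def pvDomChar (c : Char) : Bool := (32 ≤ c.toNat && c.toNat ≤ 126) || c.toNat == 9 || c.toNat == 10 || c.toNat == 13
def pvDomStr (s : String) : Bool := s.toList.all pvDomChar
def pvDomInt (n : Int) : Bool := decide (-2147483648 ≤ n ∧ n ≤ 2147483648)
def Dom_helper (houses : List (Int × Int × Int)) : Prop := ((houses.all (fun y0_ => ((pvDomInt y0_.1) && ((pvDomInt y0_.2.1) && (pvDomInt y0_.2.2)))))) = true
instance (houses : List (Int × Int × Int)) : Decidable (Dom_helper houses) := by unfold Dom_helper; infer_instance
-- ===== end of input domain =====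

-- B precomputes per grid point the house distances, a zero-distance flag and an
-- uncovered-house bitmask, turning pair validity into one mask test, and scans only
-- ordered charger pairs (the pair cost is symmetric); objective: alternative.

def pvMAXINT : Int := 2^63 - 1

-- ===== PORT A =====
-- inner house loop of phase 1: none = `break`, some temp = loop completed
def pvScan1 (cx cy : Int) (temp : Int) : List (Int × Int × Int) → Option Int
  | [] => some temp
  | (hx, hy, d) :: rest =>
    let cald := |hx - cx| + |hy - cy|
    if cald = 0 ∨ cald > d then none else pvScan1 cx cy (temp + cald) rest

-- inner house loop of phase 2
def pvScan2 (cx cy i j : Int) (temp : Int) : List (Int × Int × Int) → Option Int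
  | [] => some temp
  | (hx, hy, d) :: rest =>
    let cald1 := |hx - cx| + |hy - cy|
    let cald2 := |hx - i| + |hy - j|
    if cald1 = 0 ∨ cald2 = 0 ∨ (cald1 > d ∧ cald2 > d) then none
    else pvScan2 cx cy i j (temp + min cald1 cald2) rest

def pvR : List Int := PySem.List.pyRange (-15) 16 1

def helper (houses : List (Int × Int × Int)) : Int :=
  let ans :=
    pvR.foldl (fun ans cx =>
      pvR.foldl (fun ans cy =>
        match pvScan1 cx cy 0 houses with
        | some temp => min ans temp
        | none => ans) ans) pvMAXINT
  if ans ≠ pvMAXINT then ans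
  else
    pvR.foldl (fun ans cx =>
      pvR.foldl (fun ans cy =>
        pvR.foldl (fun ans i =>
          pvR.foldl (fun ans j =>
            match pvScan2 cx cy i j 0 houses with
            | some temp => min ans temp
            | none => ans) ans) ans) ans) ans

-- ===== PORT B =====
-- `um = 0; for b in reversed(bits): um = 2*um + (1 if b else 0)` (low bit = first house)
def pvMaskOf (bs : List Bool) : Nat :=
  bs.foldr (fun b m => 2 * m + (if b then 1 else 0)) 0

-- per grid point: (some house at distance 0, bitmask of uncovered houses, distances)
def pvPre (houses : List (Int × Int × Int)) (p : Int × Int) : Bool × Nat × List Int :=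
  let ds := houses.map (fun h => |h.1 - p.1| + |h.2.1 - p.2|)
  let z := ds.any (fun c => c == 0)
  let um := pvMaskOf (houses.map (fun h => decide (|h.1 - p.1| + |h.2.1 - p.2| > h.2.2)))
  (z, um, ds)

-- `sum(min(a, b) for a, b in zip(ds1, ds2))`
def pvSumMin (ds1 ds2 : List Int) : Int := ((ds1.zip ds2).map (fun ab => min ab.1 ab.2)).sum

def pvPts : List (Int × Int) := pvR.flatMap (fun x => pvR.map (fun y => (x, y)))

-- the `while suffix:` loop of B: pair each suffix head with every suffix member
def pvPairLoop (ans : Int) : List (Bool × Nat × List Int) → Int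
  | [] => ans
  | x :: rest => pvPairLoop ((x :: rest).foldl
      (fun b y => if !x.1 && !y.1 && (x.2.1 &&& y.2.1 == 0) then min b (pvSumMin x.2.2 y.2.2) else b) ans) rest

def helper_alt (houses : List (Int × Int × Int)) : Int :=
  let data := pvPts.map (pvPre houses)
  let ans := data.foldl (fun a x => if !x.1 && (x.2.1 == 0) then min a x.2.2.sum else a) pvMAXINT
  if ans ≠ pvMAXINT then ans else pvPairLoop ans data

-- ===== PRECONDITION & SPEC =====
def Spec_helper (houses : List (Int × Int × Int)) (out : Int) : Prop := out = helper_alt houses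
instance (houses : List (Int × Int × Int)) (out : Int) : Decidable (Spec_helper houses out) := by unfold Spec_helper; infer_instance

-- ===== CLAIM (what is proved, stated in full; the proofs are below) =====
def Claim_equal_helper : Prop := ∀ (houses : List (Int × Int × Int)), Dom_helper houses → Spec_helper houses (helper houses)

-- ===== LEMMAS AND PROOFS =====

-- the Option-valued content of B's two guarded updates
def pvG1 (x : Bool × Nat × List Int) : Option Int :=
  if !x.1 && (x.2.1 == 0) then some x.2.2.sum else none

def pvG2 (x y : Bool × Nat × List Int) : Option Int :=
  if !x.1 && !y.1 && (x.2.1 &&& y.2.1 == 0) then some (pvSumMin x.2.2 y.2.2) else none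

-- r is the minimum of a and the value set S
def pvIsMinOver (S : Int → Prop) (a r : Int) : Prop :=
  r ≤ a ∧ (∀ v, S v → r ≤ v) ∧ (r = a ∨ ∃ v, S v ∧ r = v)

theorem pvIsMinOver_eq {S T : Int → Prop} {a r1 r2 : Int}
    (h1 : pvIsMinOver S a r1) (h2 : pvIsMinOver T a r2)
    (hST : ∀ v, S v → T v ∨ v = a) (hTS : ∀ v, T v → S v ∨ v = a) : r1 = r2 := by
  obtain ⟨h1a, h1v, h1w⟩ := h1
  obtain ⟨h2a, h2v, h2w⟩ := h2
  apply le_antisymm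
  · rcases h2w with h | ⟨v, hv, hev⟩
    · omega
    · rcases hTS v hv with h | h
      · have := h1v v h; omega
      · omega
  · rcases h1w with h | ⟨v, hv, hev⟩
    · omega
    · rcases hST v hv with h | h
      · have := h2v v h; omega
      · omega

-- fold of the match-on-Option step is the min over the values the step function returns
theorem pvFoldlMatch_isMinOver {β : Type} (g : β → Option Int) (l : List β) (a : Int) :
    pvIsMinOver (fun v => ∃ x ∈ l, g x = some v) a
      (l.foldl (fun b x => match g x with | some t => min b t | none => b) a) := by
  induction l generalizing a with
  | nil => exact ⟨le_refl a, by simp, Or.inl rfl⟩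
  | cons x rest ih =>
    simp only [List.foldl_cons]
    have step : ∀ (b : Int), (match g x with | some t => min b t | none => b) ≤ b := by
      intro b; cases g x <;> simp
    obtain ⟨ha, hv, hw⟩ := ih (match g x with | some t => min a t | none => a)
    refine ⟨le_trans ha (step a), ?_, ?_⟩
    · rintro v ⟨y, hy, hgy⟩
      rcases List.mem_cons.1 hy with rfl | hy
      · calc _ ≤ _ := ha
             _ ≤ v := by rw [hgy]; exact min_le_right _ _
      · exact hv _ ⟨y, hy, hgy⟩
    · rcases hw with h | ⟨v, ⟨y, hy, hgy⟩, h⟩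
      · rcases hgx : g x with _ | t
        · rw [hgx] at h
          exact Or.inl h
        · rw [hgx] at h
          rcases le_total a t with hle | hge
          · exact Or.inl (h.trans (min_eq_left hle))
          · exact Or.inr ⟨t, ⟨x, List.mem_cons_self, hgx⟩, h.trans (min_eq_right hge)⟩
      · exact Or.inr ⟨v, ⟨y, List.mem_cons_of_mem _ hy, hgy⟩, h⟩

-- nesting: if the inner op is a min over S x for every start, the fold is a min over the union
theorem pvNested_isMinOver {β : Type} (l : List β) (op : Int → β → Int) (S : β → Int → Prop) (a : Int)
    (h : ∀ (b : Int) (x : β), x ∈ l → pvIsMinOver (S x) b (op b x)) :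
    pvIsMinOver (fun v => ∃ x ∈ l, S x v) a (l.foldl op a) := by
  induction l generalizing a with
  | nil => exact ⟨le_refl a, by simp, Or.inl rfl⟩
  | cons x rest ih =>
    simp only [List.foldl_cons]
    obtain ⟨h1a, h1v, h1w⟩ := h a x List.mem_cons_self
    obtain ⟨h2a, h2v, h2w⟩ := ih (op a x) (fun b y hy => h b y (List.mem_cons_of_mem _ hy))
    refine ⟨le_trans h2a h1a, ?_, ?_⟩
    · rintro v ⟨y, hy, hSy⟩
      rcases List.mem_cons.1 hy with rfl | hy
      · exact le_trans h2a (h1v v hSy)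
      · exact h2v v ⟨y, hy, hSy⟩
    · rcases h2w with h' | ⟨v, ⟨y, hy, hSy⟩, h'⟩
      · rw [h']
        rcases h1w with h'' | ⟨v, hSv, h''⟩
        · exact Or.inl h''
        · exact Or.inr ⟨v, ⟨x, List.mem_cons_self, hSv⟩, h''⟩
      · exact Or.inr ⟨v, ⟨y, List.mem_cons_of_mem _ hy, hSy⟩, h'⟩

-- B's guarded update steps, rewritten in match-on-Option form
theorem pvStep1_eq :
    (fun (a : Int) (x : Bool × Nat × List Int) => if !x.1 && (x.2.1 == 0) then min a x.2.2.sum else a)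
    = (fun a x => match pvG1 x with | some t => min a t | none => a) := by
  funext a x
  simp only [pvG1]
  by_cases hc : (!x.1 && (x.2.1 == 0)) = true
  · simp [hc]
  · simp [hc]

theorem pvStep2_eq (x : Bool × Nat × List Int) :
    (fun (b : Int) (y : Bool × Nat × List Int) =>
        if !x.1 && !y.1 && (x.2.1 &&& y.2.1 == 0) then min b (pvSumMin x.2.2 y.2.2) else b)
    = (fun b y => match pvG2 x y with | some t => min b t | none => b) := by
  funext b y
  simp only [pvG2]
  by_cases hc : (!x.1 && !y.1 && (x.2.1 &&& y.2.1 == 0)) = true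
  · simp [hc]
  · simp [hc]

theorem pvSumMin_comm (l1 l2 : List Int) : pvSumMin l1 l2 = pvSumMin l2 l1 := by
  unfold pvSumMin
  rw [← List.zip_swap l2 l1, List.map_map]
  apply congrArg
  apply List.map_congr_left
  intro ab _
  simp [Function.comp, min_comm]

theorem pvG2_comm (x y : Bool × Nat × List Int) : pvG2 x y = pvG2 y x := by
  unfold pvG2
  rw [Nat.and_comm x.2.1 y.2.1, Bool.and_comm (!x.1) (!y.1), pvSumMin_comm]

-- the symmetry-halved pair loop is a min over ALL pairs
theorem pvPairLoop_isMinOver (l : List (Bool × Nat × List Int)) (a : Int) :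
    pvIsMinOver (fun v => ∃ x ∈ l, ∃ y ∈ l, pvG2 x y = some v) a (pvPairLoop a l) := by
  induction l generalizing a with
  | nil => exact ⟨le_refl a, by simp, Or.inl rfl⟩
  | cons p rest ih =>
    rw [pvPairLoop, pvStep2_eq p]
    obtain ⟨h1a, h1v, h1w⟩ := pvFoldlMatch_isMinOver (pvG2 p) (p :: rest) a
    obtain ⟨h2a, h2v, h2w⟩ :=
      ih ((p :: rest).foldl (fun b y => match pvG2 p y with | some t => min b t | none => b) a)
    refine ⟨le_trans h2a h1a, ?_, ?_⟩
    · rintro v ⟨x, hx, y, hy, hg⟩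
      rcases List.mem_cons.1 hx with hxp | hx
      · rw [hxp] at hg
        exact le_trans h2a (h1v _ ⟨y, hy, hg⟩)
      · rcases List.mem_cons.1 hy with hyp | hy
        · rw [hyp, pvG2_comm] at hg
          exact le_trans h2a (h1v _ ⟨x, List.mem_cons_of_mem _ hx, hg⟩)
        · exact h2v _ ⟨x, hx, y, hy, hg⟩
    · rcases h2w with h' | ⟨v, ⟨x, hx, y, hy, hg⟩, h'⟩
      · rw [h']
        rcases h1w with h'' | ⟨v, ⟨q, hq, hg⟩, h''⟩
        · exact Or.inl h''
        · exact Or.inr ⟨v, ⟨p, List.mem_cons_self, q, hq, hg⟩, h''⟩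
      · exact Or.inr ⟨v, ⟨x, List.mem_cons_of_mem _ hx, y, List.mem_cons_of_mem _ hy, hg⟩, h'⟩

-- mask arithmetic
theorem pvMaskOf_cons (b : Bool) (bs : List Bool) : pvMaskOf (b :: bs) = Nat.bit b (pvMaskOf bs) := by
  cases b <;> simp [pvMaskOf, Nat.bit_val]

theorem pvBit_eq_zero (v : Bool) (n : Nat) : Nat.bit v n = 0 ↔ (v = false ∧ n = 0) := by
  cases v <;> simp [Nat.bit_val]

theorem pvMaskOf_eq_zero (bs : List Bool) : pvMaskOf bs = 0 ↔ ∀ b ∈ bs, b = false := by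
  induction bs with
  | nil => simp [pvMaskOf]
  | cons b bs ih =>
    rw [pvMaskOf_cons, pvBit_eq_zero, ih]
    simp

theorem pvBit_and (x y : Bool) (m k : Nat) :
    (Nat.bit x m) &&& (Nat.bit y k) = Nat.bit (x && y) (m &&& k) := by
  apply Nat.eq_of_testBit_eq
  intro i
  cases i with
  | zero => simp
  | succ n => simp [Nat.testBit_and, Nat.testBit_bit_succ]

theorem pvMask_and_zero (bs cs : List Bool) :
    (pvMaskOf bs &&& pvMaskOf cs = 0) ↔ ∀ p ∈ bs.zip cs, ¬(p.1 = true ∧ p.2 = true) := by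
  induction bs generalizing cs with
  | nil => simp [pvMaskOf, Nat.zero_and]
  | cons b bs ih =>
    cases cs with
    | nil => simp [pvMaskOf, Nat.and_zero]
    | cons c cs =>
      rw [pvMaskOf_cons, pvMaskOf_cons, pvBit_and, pvBit_eq_zero, ih]
      cases b <;> cases c <;> simp

-- A's phase-1 scan, in terms of B's validity test and sum
theorem pvScan1_eq (cx cy : Int) (houses : List (Int × Int × Int)) (t : Int) :
    pvScan1 cx cy t houses =
      if houses.all (fun h => decide (|h.1 - cx| + |h.2.1 - cy| ≠ 0 ∧ |h.1 - cx| + |h.2.1 - cy| ≤ h.2.2))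
      then some (t + (houses.map (fun h => |h.1 - cx| + |h.2.1 - cy|)).sum)
      else none := by
  induction houses generalizing t with
  | nil => simp [pvScan1]
  | cons h rest ih =>
    obtain ⟨hx, hy, d⟩ := h
    simp only [pvScan1, List.all_cons, List.map_cons, List.sum_cons]
    by_cases hbad : |hx - cx| + |hy - cy| = 0 ∨ |hx - cx| + |hy - cy| > d
    · rw [if_pos hbad]
      have hnok : ¬ (|hx - cx| + |hy - cy| ≠ 0 ∧ |hx - cx| + |hy - cy| ≤ d) := by omega
      rw [decide_eq_false hnok, Bool.false_and]
      simp
    · rw [if_neg hbad, ih]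
      have hok : (|hx - cx| + |hy - cy| ≠ 0 ∧ |hx - cx| + |hy - cy| ≤ d) := by omega
      rw [decide_eq_true hok, Bool.true_and]
      split
      · congr 1; ring
      · rfl

-- A's phase-2 scan, in terms of B's validity test and sum
theorem pvScan2_eq (cx cy i j : Int) (houses : List (Int × Int × Int)) (t : Int) :
    pvScan2 cx cy i j t houses =
      if houses.all (fun h => decide (|h.1 - cx| + |h.2.1 - cy| ≠ 0 ∧ |h.1 - i| + |h.2.1 - j| ≠ 0 ∧
            (|h.1 - cx| + |h.2.1 - cy| ≤ h.2.2 ∨ |h.1 - i| + |h.2.1 - j| ≤ h.2.2)))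
      then some (t + (houses.map (fun h => min (|h.1 - cx| + |h.2.1 - cy|) (|h.1 - i| + |h.2.1 - j|))).sum)
      else none := by
  induction houses generalizing t with
  | nil => simp [pvScan2]
  | cons h rest ih =>
    obtain ⟨hx, hy, d⟩ := h
    simp only [pvScan2, List.all_cons, List.map_cons, List.sum_cons]
    by_cases hbad : |hx - cx| + |hy - cy| = 0 ∨ |hx - i| + |hy - j| = 0 ∨
        (|hx - cx| + |hy - cy| > d ∧ |hx - i| + |hy - j| > d)
    · rw [if_pos hbad]
      have hnok : ¬ (|hx - cx| + |hy - cy| ≠ 0 ∧ |hx - i| + |hy - j| ≠ 0 ∧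
          (|hx - cx| + |hy - cy| ≤ d ∨ |hx - i| + |hy - j| ≤ d)) := by omega
      rw [decide_eq_false hnok, Bool.false_and]
      simp
    · rw [if_neg hbad, ih]
      have hok : (|hx - cx| + |hy - cy| ≠ 0 ∧ |hx - i| + |hy - j| ≠ 0 ∧
          (|hx - cx| + |hy - cy| ≤ d ∨ |hx - i| + |hy - j| ≤ d)) := by omega
      rw [decide_eq_true hok, Bool.true_and]
      split
      · congr 1; ring
      · rfl

theorem pvMem_pts (p : Int × Int) : p ∈ pvPts ↔ p.1 ∈ pvR ∧ p.2 ∈ pvR := by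
  obtain ⟨x, y⟩ := p
  constructor
  · intro hmem
    obtain ⟨a, ha, hb⟩ := List.mem_flatMap.1 hmem
    obtain ⟨b, hb', heq⟩ := List.mem_map.1 hb
    obtain ⟨h1, h2⟩ := Prod.mk.injEq .. ▸ heq
    exact ⟨h1 ▸ ha, h2 ▸ hb'⟩
  · rintro ⟨hx, hy⟩
    exact List.mem_flatMap.2 ⟨x, hx, List.mem_map.2 ⟨y, hy, rfl⟩⟩

-- B's precomputed one-charger test/value equals A's phase-1 scan
theorem pvG1_pre (houses : List (Int × Int × Int)) (p : Int × Int) :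
    pvG1 (pvPre houses p) = pvScan1 p.1 p.2 0 houses := by
  rw [pvScan1_eq]
  simp only [pvG1, pvPre]
  have hcond : (!(houses.map (fun h => |h.1 - p.1| + |h.2.1 - p.2|)).any (fun c => c == 0)
        && (pvMaskOf (houses.map (fun h => decide (|h.1 - p.1| + |h.2.1 - p.2| > h.2.2))) == 0))
      = houses.all (fun h => decide (|h.1 - p.1| + |h.2.1 - p.2| ≠ 0 ∧ |h.1 - p.1| + |h.2.1 - p.2| ≤ h.2.2)) := by
    rw [Bool.eq_iff_iff]
    simp only [Bool.and_eq_true, Bool.not_eq_true', beq_iff_eq, List.any_eq_false,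
      List.all_eq_true, decide_eq_true_eq, pvMaskOf_eq_zero]
    constructor
    · rintro ⟨hz, hm⟩ h hh
      have h1 := hz _ (List.mem_map_of_mem hh)
      have h2 := hm _ (List.mem_map_of_mem hh)
      rw [decide_eq_false_iff_not] at h2
      omega
    · intro hall
      constructor
      · intro c hc
        obtain ⟨h, hh, rfl⟩ := List.mem_map.1 hc
        have := hall h hh
        omega
      · intro b hb
        obtain ⟨h, hh, rfl⟩ := List.mem_map.1 hb
        have := hall h hh
        rw [decide_eq_false_iff_not]
        omega
  rw [hcond]
  split
  · rw [zero_add]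
  · rfl

-- B's precomputed two-charger test/value equals A's phase-2 scan
theorem pvG2_pre (houses : List (Int × Int × Int)) (p q : Int × Int) :
    pvG2 (pvPre houses p) (pvPre houses q) = pvScan2 p.1 p.2 q.1 q.2 0 houses := by
  rw [pvScan2_eq]
  simp only [pvG2, pvPre]
  have hcond : (!(houses.map (fun h => |h.1 - p.1| + |h.2.1 - p.2|)).any (fun c => c == 0)
        && !(houses.map (fun h => |h.1 - q.1| + |h.2.1 - q.2|)).any (fun c => c == 0)
        && ((pvMaskOf (houses.map (fun h => decide (|h.1 - p.1| + |h.2.1 - p.2| > h.2.2)))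
            &&& pvMaskOf (houses.map (fun h => decide (|h.1 - q.1| + |h.2.1 - q.2| > h.2.2)))) == 0))
      = houses.all (fun h => decide (|h.1 - p.1| + |h.2.1 - p.2| ≠ 0 ∧ |h.1 - q.1| + |h.2.1 - q.2| ≠ 0 ∧
          (|h.1 - p.1| + |h.2.1 - p.2| ≤ h.2.2 ∨ |h.1 - q.1| + |h.2.1 - q.2| ≤ h.2.2))) := by
    rw [Bool.eq_iff_iff]
    rw [Bool.and_eq_true, Bool.and_eq_true]
    rw [beq_iff_eq, pvMask_and_zero, List.zip_map']
    simp only [Bool.not_eq_true', List.any_eq_false, beq_iff_eq, List.all_eq_true,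
      decide_eq_true_eq]
    constructor
    · rintro ⟨⟨hz1, hz2⟩, hm⟩ h hh
      have h1 := hz1 _ (List.mem_map_of_mem hh)
      have h2 := hz2 _ (List.mem_map_of_mem hh)
      have h3 := hm _ (List.mem_map_of_mem hh)
      simp only [decide_eq_true_eq] at h3
      omega
    · intro hall
      refine ⟨⟨?_, ?_⟩, ?_⟩
      · intro c hc
        obtain ⟨h, hh, rfl⟩ := List.mem_map.1 hc
        have := hall h hh
        omega
      · intro c hc
        obtain ⟨h, hh, rfl⟩ := List.mem_map.1 hc
        have := hall h hh
        omega
      · intro pr hpr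
        obtain ⟨h, hh, rfl⟩ := List.mem_map.1 hpr
        have := hall h hh
        simp only [decide_eq_true_eq]
        omega
  rw [hcond]
  split
  · rw [pvSumMin, List.zip_map', List.map_map]
    rw [zero_add]
    rfl
  · rfl

-- phase-1 results of A and B coincide
theorem pvPhase1_eq (houses : List (Int × Int × Int)) :
    pvR.foldl (fun ans cx =>
      pvR.foldl (fun ans cy =>
        match pvScan1 cx cy 0 houses with
        | some temp => min ans temp
        | none => ans) ans) pvMAXINT
    = (pvPts.map (pvPre houses)).foldl
        (fun a x => if !x.1 && (x.2.1 == 0) then min a x.2.2.sum else a) pvMAXINT := by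
  rw [pvStep1_eq]
  have hA := pvNested_isMinOver pvR
      (fun ans cx => pvR.foldl (fun ans cy =>
        match pvScan1 cx cy 0 houses with
        | some temp => min ans temp
        | none => ans) ans)
      (fun cx v => ∃ cy ∈ pvR, pvScan1 cx cy 0 houses = some v) pvMAXINT
      (fun b cx _ => pvFoldlMatch_isMinOver (fun cy => pvScan1 cx cy 0 houses) pvR b)
  have hB := pvFoldlMatch_isMinOver pvG1 (pvPts.map (pvPre houses)) pvMAXINT
  refine pvIsMinOver_eq hA hB ?_ ?_
  · rintro v ⟨cx, hcx, cy, hcy, hscan⟩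
    refine Or.inl ⟨pvPre houses (cx, cy),
      List.mem_map.2 ⟨(cx, cy), (pvMem_pts (cx, cy)).2 ⟨hcx, hcy⟩, rfl⟩, ?_⟩
    rw [pvG1_pre]
    exact hscan
  · rintro v ⟨x, hx, hg⟩
    obtain ⟨p, hp, rfl⟩ := List.mem_map.1 hx
    obtain ⟨hp1, hp2⟩ := (pvMem_pts p).1 hp
    refine Or.inl ⟨p.1, hp1, p.2, hp2, ?_⟩
    rw [← pvG1_pre]
    exact hg

-- phase-2 results of A and B coincide (both started from pvMAXINT)
theorem pvPhase2_eq (houses : List (Int × Int × Int)) :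
    pvR.foldl (fun ans cx =>
      pvR.foldl (fun ans cy =>
        pvR.foldl (fun ans i =>
          pvR.foldl (fun ans j =>
            match pvScan2 cx cy i j 0 houses with
            | some temp => min ans temp
            | none => ans) ans) ans) ans) pvMAXINT
    = pvPairLoop pvMAXINT (pvPts.map (pvPre houses)) := by
  have hA := pvNested_isMinOver pvR _
      (fun cx v => ∃ cy ∈ pvR, ∃ i ∈ pvR, ∃ j ∈ pvR, pvScan2 cx cy i j 0 houses = some v) pvMAXINT
      (fun b cx _ => pvNested_isMinOver pvR _
        (fun cy v => ∃ i ∈ pvR, ∃ j ∈ pvR, pvScan2 cx cy i j 0 houses = some v) b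
        (fun b cy _ => pvNested_isMinOver pvR _
          (fun i v => ∃ j ∈ pvR, pvScan2 cx cy i j 0 houses = some v) b
          (fun b i _ => pvFoldlMatch_isMinOver (fun j => pvScan2 cx cy i j 0 houses) pvR b)))
  have hB := pvPairLoop_isMinOver (pvPts.map (pvPre houses)) pvMAXINT
  refine pvIsMinOver_eq hA hB ?_ ?_
  · rintro v ⟨cx, hcx, cy, hcy, i, hi, j, hj, hscan⟩
    refine Or.inl ⟨pvPre houses (cx, cy),
      List.mem_map.2 ⟨(cx, cy), (pvMem_pts (cx, cy)).2 ⟨hcx, hcy⟩, rfl⟩,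
      pvPre houses (i, j),
      List.mem_map.2 ⟨(i, j), (pvMem_pts (i, j)).2 ⟨hi, hj⟩, rfl⟩, ?_⟩
    rw [pvG2_pre]
    exact hscan
  · rintro v ⟨x, hx, y, hy, hg⟩
    obtain ⟨p, hp, rfl⟩ := List.mem_map.1 hx
    obtain ⟨q, hq, rfl⟩ := List.mem_map.1 hy
    obtain ⟨hp1, hp2⟩ := (pvMem_pts p).1 hp
    obtain ⟨hq1, hq2⟩ := (pvMem_pts q).1 hq
    refine Or.inl ⟨p.1, hp1, p.2, hp2, q.1, hq1, q.2, hq2, ?_⟩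
    rw [← pvG2_pre]
    exact hg

-- ===== VERDICT (by name: the statement is the Claim_ definition above) =====
theorem helper_spec : Claim_equal_helper := by
  intro houses _
  unfold Spec_helper helper helper_alt
  simp only []
  rw [pvPhase1_eq houses]
  by_cases h : (pvPts.map (pvPre houses)).foldl
      (fun a x => if !x.1 && (x.2.1 == 0) then min a x.2.2.sum else a) pvMAXINT ≠ pvMAXINT
  · rw [if_pos h, if_pos h]
  · rw [if_neg h, if_neg h, not_ne_iff.1 h]
    exact pvPhase2_eq houses
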